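-- pv_equiv track=rewrite | github.com/Raghavan1988/XAI_analysis_arxiv | gen_plot.py | analyze_documents
-- ===== SOURCE A (Python) =====
-- def analyze_documents(documents, K1, K2, K3):
--     """Analyze documents to find matches with given keyword sets."""
--     denom_ids, num_ids = set(), set()
--     keywords1_dict, keywords2_dict, keywords3_dict = {}, {}, {}
--     keyword1_keyword2_dict = {}
--
--     for i, document in enumerate(documents):
--         content = document.lower()
--         if any(keyword in content for keyword in K1):
--             update_keyword_dicts(document, i, K1, K2, K3, denom_ids, num_ids, keywords1_dict, keywords2_dict, keywords3_dict, keyword1_keyword2_dict)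
--
--     return denom_ids, num_ids, keywords1_dict, keywords2_dict, keywords3_dict, keyword1_keyword2_dict
--
-- def update_keyword_dicts(document, i, K1, K2, K3, denom_ids, num_ids, k1_dict, k2_dict, k3_dict, k1_k2_dict):
--     """Update dictionaries and sets based on document analysis."""
--     content = document.lower()
--     for keyword in K1:
--         if keyword in content:
--             k1_dict[keyword] = k1_dict.get(keyword, 0) + 1
--             denom_ids.add(i)
--             update_for_keyword_pairs(content, i, K2, num_ids, k2_dict, keyword, k1_k2_dict)
--             update_for_keyword3(content, K3, k3_dict)
--
-- def update_for_keyword_pairs(content, i, K2, num_ids, k2_dict, keyword1, k1_k2_dict):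
--     """Update data structures for keyword pairs."""
--     for k2 in K2:
--         if k2 in content:
--             k2_dict[k2] = k2_dict.get(k2, 0) + 1
--             k1_k2_dict[keyword1 + "_" + k2] = k1_k2_dict.get(keyword1 + "_" + k2, 0) + 1
--             num_ids.add(i)
--             break
--
-- def update_for_keyword3(content, K3, k3_dict):
--     """Update keyword3 dictionary."""
--     for k3 in K3:
--         if k3 in content:
--             k3_dict[k3] = k3_dict.get(k3, 0) + 1
-- ===== SOURCE B (Python) =====
-- def analyze_documents(documents, K1, K2, K3):
--     """Analyze documents to find matches with given keyword sets.
--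
--     Single-scan-per-keyword-list decomposition: compute the list of matching
--     K1 keywords and the first matching K2 keyword once per document, then
--     aggregate with += len(m1) arithmetic instead of rescanning per k1 match.
--     """
--     denom_ids, num_ids = set(), set()
--     k1_dict, k2_dict, k3_dict, k1_k2_dict = {}, {}, {}, {}
--     for i, document in enumerate(documents):
--         content = document.lower()
--         m1 = [k for k in K1 if k in content]
--         if not m1:
--             continue
--         n = len(m1)
--         denom_ids.add(i)
--         for k1 in m1:
--             k1_dict[k1] = k1_dict.get(k1, 0) + 1
--         first_k2 = next((k for k in K2 if k in content), None)
--         if first_k2 is not None: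
--             num_ids.add(i)
--             k2_dict[first_k2] = k2_dict.get(first_k2, 0) + n
--             for k1 in m1:
--                 key = k1 + "_" + first_k2
--                 k1_k2_dict[key] = k1_k2_dict.get(key, 0) + 1
--         for k3 in K3:
--             if k3 in content:
--                 k3_dict[k3] = k3_dict.get(k3, 0) + n
--     return denom_ids, num_ids, k1_dict, k2_dict, k3_dict, k1_k2_dict
-- ===== Notes on version B (the rewrite author's own statement) =====
-- stated objective: faster
-- what changed: B scans each keyword list once per document (list of K1 matches, first K2 match, K3 matches) and aggregates with += len(m1) arithmetic, instead of A's nested rescans of K2 and K3 for every matching K1 keyword under a redundant any() pre-check.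
import Mathlib
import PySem

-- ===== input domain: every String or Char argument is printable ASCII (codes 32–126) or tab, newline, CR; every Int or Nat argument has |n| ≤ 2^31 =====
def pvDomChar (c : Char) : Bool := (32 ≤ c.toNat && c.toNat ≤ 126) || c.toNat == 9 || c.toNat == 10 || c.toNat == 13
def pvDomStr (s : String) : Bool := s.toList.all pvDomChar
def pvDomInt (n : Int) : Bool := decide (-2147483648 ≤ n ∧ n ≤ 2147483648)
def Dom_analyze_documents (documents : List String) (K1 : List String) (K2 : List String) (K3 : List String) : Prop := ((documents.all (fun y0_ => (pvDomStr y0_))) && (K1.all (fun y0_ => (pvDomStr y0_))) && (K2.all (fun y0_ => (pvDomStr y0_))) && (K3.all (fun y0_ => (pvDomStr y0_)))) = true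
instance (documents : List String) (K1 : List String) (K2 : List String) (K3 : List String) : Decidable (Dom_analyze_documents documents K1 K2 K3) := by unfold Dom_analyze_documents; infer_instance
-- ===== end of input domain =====

-- B replaces A's nested per-k1 rescans of K2/K3 with one scan of each keyword list per document
-- plus "+= len(m1)" aggregation (objective: faster by removing the nested rescans).


-- The 6-component state threaded by both programs:
-- (denom_ids, num_ids, keywords1_dict, keywords2_dict, keywords3_dict, keyword1_keyword2_dict)
abbrev PvSt := PySem.Set Int × PySem.Set Int × PySem.Dict String Int × PySem.Dict String Int ×
  PySem.Dict String Int × PySem.Dict String Int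

-- ===== PORT A =====
-- update_for_keyword_pairs: loop over K2, update on the first match, break
def pvA_pairs (content : String) (i : Int) (K2 : List String) (num_ids : PySem.Set Int)
    (k2_dict : PySem.Dict String Int) (keyword1 : String) (k1_k2_dict : PySem.Dict String Int) :
    PySem.Set Int × PySem.Dict String Int × PySem.Dict String Int :=
  match K2 with
  | [] => (num_ids, k2_dict, k1_k2_dict)
  | k2 :: rest =>
      if PySem.Str.isIn k2 content then
        (PySem.Set.add num_ids i,
         k2_dict.insert k2 (k2_dict.getD k2 0 + 1),
         k1_k2_dict.insert (keyword1 ++ "_" ++ k2) (k1_k2_dict.getD (keyword1 ++ "_" ++ k2) 0 + 1))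
      else
        pvA_pairs content i rest num_ids k2_dict keyword1 k1_k2_dict

-- update_for_keyword3
def pvA_k3 (content : String) (K3 : List String) (k3_dict : PySem.Dict String Int) :
    PySem.Dict String Int :=
  K3.foldl (fun d k3 => if PySem.Str.isIn k3 content then d.insert k3 (d.getD k3 0 + 1) else d) k3_dict

-- update_keyword_dicts
def pvA_update (document : String) (i : Int) (K1 K2 K3 : List String) (st : PvSt) : PvSt :=
  let content := PySem.Str.lower document
  K1.foldl (fun st keyword =>
    if PySem.Str.isIn keyword content then
      let d1 := st.2.2.1.insert keyword (st.2.2.1.getD keyword 0 + 1)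
      let denom := PySem.Set.add st.1 i
      let r := pvA_pairs content i K2 st.2.1 st.2.2.2.1 keyword st.2.2.2.2.2
      let d3 := pvA_k3 content K3 st.2.2.2.2.1
      (denom, r.1, d1, r.2.1, d3, r.2.2)
    else st) st

def analyze_documents (documents : List String) (K1 : List String) (K2 : List String) (K3 : List String) : List Int × List Int × (List (String × Int)) × (List (String × Int)) × (List (String × Int)) × (List (String × Int)) :=
  let st : PvSt :=
    (PySem.List.enumerate documents).foldl (fun st p =>
      let content := PySem.Str.lower p.2
      if K1.any (fun keyword => PySem.Str.isIn keyword content) then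
        pvA_update p.2 p.1 K1 K2 K3 st
      else st)
      (PySem.Set.empty, PySem.Set.empty, PySem.Dict.empty, PySem.Dict.empty, PySem.Dict.empty, PySem.Dict.empty)
  (st.1, st.2.1, st.2.2.1.items, st.2.2.2.1.items, st.2.2.2.2.1.items, st.2.2.2.2.2.items)

-- ===== PORT B =====
-- one document of B: single scan of K1 (m1), first K2 match, single scan of K3 with += n
def pvB_step (K1 K2 K3 : List String) (st : PvSt) (i : Int) (document : String) : PvSt :=
  let content := PySem.Str.lower document
  let m1 := K1.filter (fun k => PySem.Str.isIn k content)
  if m1.isEmpty then st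
  else
    let n : Int := m1.length
    let denom := PySem.Set.add st.1 i
    let d1 := m1.foldl (fun d k1 => d.insert k1 (d.getD k1 0 + 1)) st.2.2.1
    let d3 := K3.foldl (fun d k3 => if PySem.Str.isIn k3 content then d.insert k3 (d.getD k3 0 + n) else d) st.2.2.2.2.1
    match K2.find? (fun k => PySem.Str.isIn k content) with
    | some first_k2 =>
        (denom, PySem.Set.add st.2.1 i, d1,
         st.2.2.2.1.insert first_k2 (st.2.2.2.1.getD first_k2 0 + n), d3,
         m1.foldl (fun d k1 =>
           d.insert (k1 ++ "_" ++ first_k2) (d.getD (k1 ++ "_" ++ first_k2) 0 + 1)) st.2.2.2.2.2)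
    | none => (denom, st.2.1, d1, st.2.2.2.1, d3, st.2.2.2.2.2)

def analyze_documents_alt (documents : List String) (K1 : List String) (K2 : List String) (K3 : List String) : List Int × List Int × (List (String × Int)) × (List (String × Int)) × (List (String × Int)) × (List (String × Int)) :=
  let st : PvSt :=
    (PySem.List.enumerate documents).foldl (fun st p => pvB_step K1 K2 K3 st p.1 p.2)
      (PySem.Set.empty, PySem.Set.empty, PySem.Dict.empty, PySem.Dict.empty, PySem.Dict.empty, PySem.Dict.empty)
  (st.1, st.2.1, st.2.2.1.items, st.2.2.2.1.items, st.2.2.2.2.1.items, st.2.2.2.2.2.items)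

-- ===== PRECONDITION & SPEC =====
-- DecidableEq of the 6-tuple output, assembled explicitly (plain instance search times out on the 6-fold product)
def pvDecEqOut : DecidableEq (List Int × List Int × (List (String × Int)) × (List (String × Int)) × (List (String × Int)) × (List (String × Int))) :=
  @instDecidableEqProd _ _ (inferInstance : DecidableEq (List Int))
    (@instDecidableEqProd _ _ (inferInstance : DecidableEq (List Int))
      (@instDecidableEqProd _ _ (inferInstance : DecidableEq (List (String × Int)))
        (@instDecidableEqProd _ _ (inferInstance : DecidableEq (List (String × Int)))
          (@instDecidableEqProd _ _ (inferInstance : DecidableEq (List (String × Int)))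
            (inferInstance : DecidableEq (List (String × Int)))))))

def Spec_analyze_documents (documents : List String) (K1 : List String) (K2 : List String) (K3 : List String) (out : List Int × List Int × (List (String × Int)) × (List (String × Int)) × (List (String × Int)) × (List (String × Int))) : Prop := out = analyze_documents_alt documents K1 K2 K3
instance (documents : List String) (K1 : List String) (K2 : List String) (K3 : List String) (out : List Int × List Int × (List (String × Int)) × (List (String × Int)) × (List (String × Int)) × (List (String × Int))) : Decidable (Spec_analyze_documents documents K1 K2 K3 out) := by unfold Spec_analyze_documents; exact pvDecEqOut _ _

-- ===== CLAIM (what is proved, stated in full; the proofs are below) =====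
def Claim_equal_analyze_documents : Prop := ∀ (documents : List String) (K1 : List String) (K2 : List String) (K3 : List String), Dom_analyze_documents documents K1 K2 K3 → Spec_analyze_documents documents K1 K2 K3 (analyze_documents documents K1 K2 K3)

-- ===== LEMMAS AND PROOFS =====

-- two inserts at distinct keys commute when the first key is already present
theorem pv_insert_comm_of_contains (d : PySem.Dict String Int) (k k' : String) (v v' : Int)
    (h : d.contains k = true) (hne : k' ≠ k) :
    (d.insert k v).insert k' v' = (d.insert k' v').insert k v := by
  apply PySem.Dict.ext
  by_cases hk' : d.contains k' = true
  · have h1 : (d.insert k v).contains k' = true := by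
      simp [PySem.Dict.contains_insert, hk']
    have h2 : (d.insert k' v').contains k = true := by
      simp [PySem.Dict.contains_insert, h]
    rw [PySem.Dict.items_insert_of_contains _ v' h1,
        PySem.Dict.items_insert_of_contains _ v h,
        PySem.Dict.items_insert_of_contains _ v h2,
        PySem.Dict.items_insert_of_contains _ v' hk']
    simp only [List.map_map]
    apply List.map_congr_left
    intro p _
    by_cases hpk : p.1 = k <;> by_cases hpk' : p.1 = k' <;>
      simp_all [Function.comp, Ne.symm hne]
  · have h1 : (d.insert k v).contains k' = false := by
      simp [PySem.Dict.contains_insert]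
      exact ⟨hne, by simpa using hk'⟩
    have h2 : (d.insert k' v').contains k = true := by
      simp [PySem.Dict.contains_insert, h]
    rw [PySem.Dict.items_insert_of_not_contains _ v' h1,
        PySem.Dict.items_insert_of_contains _ v h,
        PySem.Dict.items_insert_of_contains _ v h2,
        PySem.Dict.items_insert_of_not_contains _ v' (by simpa using hk')]
    rw [List.map_append]
    simp [hne]

-- a "+= c at key k" update; all K3/K2 counting below is phrased with it
def pvBump (k : String) (c : Int) (d : PySem.Dict String Int) : PySem.Dict String Int :=
  d.insert k (d.getD k 0 + c)

theorem pvBump_bump_self (k : String) (a b : Int) (d : PySem.Dict String Int) :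
    pvBump k b (pvBump k a d) = pvBump k (a + b) d := by
  simp [pvBump, PySem.Dict.insert_insert_self, PySem.Dict.getD_insert_self, add_assoc]

theorem pvBump_comm_of_contains (k k' : String) (a b : Int) (d : PySem.Dict String Int)
    (h : d.contains k = true) :
    pvBump k' b (pvBump k a d) = pvBump k a (pvBump k' b d) := by
  by_cases hkk : k' = k
  · subst hkk; rw [pvBump_bump_self, pvBump_bump_self, add_comm]
  · have hgd : (pvBump k a d).getD k' 0 = d.getD k' 0 := by
      simp only [pvBump]; exact PySem.Dict.getD_insert_of_ne d _ 0 hkk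
    have hgd' : (pvBump k' b d).getD k 0 = d.getD k 0 := by
      simp only [pvBump]; exact PySem.Dict.getD_insert_of_ne d _ 0 (Ne.symm hkk)
    show (pvBump k a d).insert k' ((pvBump k a d).getD k' 0 + b) =
      (pvBump k' b d).insert k ((pvBump k' b d).getD k 0 + a)
    rw [hgd, hgd']
    exact pv_insert_comm_of_contains d k k' _ _ h hkk

-- one conditional bump-pass over a keyword list, adding c at every matching key
def pvPass (q : String → Bool) (K : List String) (c : Int) (d : PySem.Dict String Int) :
    PySem.Dict String Int :=
  K.foldl (fun d k => if q k then pvBump k c d else d) d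

theorem pvPass_cons (q : String → Bool) (x : String) (xs : List String) (c : Int)
    (d : PySem.Dict String Int) :
    pvPass q (x :: xs) c d = pvPass q xs c (if q x = true then pvBump x c d else d) := rfl

theorem pvBump_pvPass_comm (q : String → Bool) (K : List String) (c b : Int) (k : String)
    (d : PySem.Dict String Int) (h : d.contains k = true) :
    pvBump k b (pvPass q K c d) = pvPass q K c (pvBump k b d) := by
  induction K generalizing d with
  | nil => simp [pvPass]
  | cons x xs ih =>
      rw [pvPass_cons, pvPass_cons]
      by_cases hx : q x = true
      · rw [if_pos hx, if_pos hx,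
            ih _ (by simp [pvBump, PySem.Dict.contains_insert, h]),
            pvBump_comm_of_contains k x b c d h]
      · rw [if_neg hx, if_neg hx]
        exact ih _ h

theorem pvPass_pvPass (q : String → Bool) (K : List String) (a b : Int)
    (d : PySem.Dict String Int) :
    pvPass q K b (pvPass q K a d) = pvPass q K (a + b) d := by
  induction K generalizing d with
  | nil => simp [pvPass]
  | cons x xs ih =>
      rw [pvPass_cons, pvPass_cons, pvPass_cons]
      by_cases hx : q x = true
      · rw [if_pos hx, if_pos hx, if_pos hx]
        have hmove : pvBump x b (pvPass q xs a (pvBump x a d)) =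
            pvPass q xs a (pvBump x b (pvBump x a d)) :=
          pvBump_pvPass_comm q xs a b x _ (by simp [pvBump])
        rw [hmove, pvBump_bump_self, ih]
      · rw [if_neg hx, if_neg hx, if_neg hx]
        exact ih d

-- repeating a 1-pass n ≥ 1 times is a single n-pass
theorem pvPass_repeat (q : String → Bool) (K : List String) (l : List String)
    (hl : l ≠ []) (d : PySem.Dict String Int) :
    l.foldl (fun d _ => pvPass q K 1 d) d = pvPass q K (l.length : Int) d := by
  induction l generalizing d with
  | nil => exact absurd rfl hl
  | cons x xs ih =>
      by_cases hxs : xs = []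
      · subst hxs; simp
      · simp only [List.foldl_cons]
        rw [ih hxs, pvPass_pvPass]
        congr 1
        simp
        ring

-- repeated Set.add i collapses
theorem pv_foldl_set_add_add (l : List String) (s : PySem.Set Int) (i : Int) :
    l.foldl (fun s _ => PySem.Set.add s i) (PySem.Set.add s i) = PySem.Set.add s i := by
  induction l with
  | nil => rfl
  | cons x xs ih =>
      simp only [List.foldl_cons]
      rw [PySem.Set.add_of_mem (by simp [PySem.Set.mem_add])]
      exact ih

theorem pv_foldl_set_add (l : List String) (hl : l ≠ []) (s : PySem.Set Int) (i : Int) :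
    l.foldl (fun s _ => PySem.Set.add s i) s = PySem.Set.add s i := by
  cases l with
  | nil => exact absurd rfl hl
  | cons x xs => simpa using pv_foldl_set_add_add xs s i

-- characterization of A's update_for_keyword_pairs via the first K2 match
theorem pvA_pairs_eq (content : String) (i : Int) (K2 : List String) (num : PySem.Set Int)
    (d2 : PySem.Dict String Int) (kw : String) (d12 : PySem.Dict String Int) :
    pvA_pairs content i K2 num d2 kw d12 =
      match K2.find? (fun k => PySem.Str.isIn k content) with
      | none => (num, d2, d12)
      | some k2 =>
          (PySem.Set.add num i, pvBump k2 1 d2, pvBump (kw ++ "_" ++ k2) 1 d12) := by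
  induction K2 with
  | nil => simp [pvA_pairs]
  | cons k2 rest ih =>
      by_cases h : PySem.Str.isIn k2 content = true
      · rw [PySem.Str.isIn_eq] at h
        simp [pvA_pairs, h, pvBump]
      · rw [Bool.not_eq_true, PySem.Str.isIn_eq] at h
        simp only [pvA_pairs, PySem.Str.isIn_eq, h, Bool.false_eq_true, if_false,
          List.find?_cons] at *
        simpa [h] using ih

-- a 6-tuple fold whose components do not interact splits into componentwise folds
theorem pv_foldl_prod6 {α S1 S2 S3 S4 S5 S6 : Type}
    (l : List α) (f1 : S1 → α → S1) (f2 : S2 → α → S2) (f3 : S3 → α → S3)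
    (f4 : S4 → α → S4) (f5 : S5 → α → S5) (f6 : S6 → α → S6)
    (a : S1) (b : S2) (c : S3) (d : S4) (e : S5) (f : S6) :
    l.foldl (fun st x => (f1 st.1 x, f2 st.2.1 x, f3 st.2.2.1 x, f4 st.2.2.2.1 x,
        f5 st.2.2.2.2.1 x, f6 st.2.2.2.2.2 x)) (a, b, c, d, e, f) =
      (l.foldl f1 a, l.foldl f2 b, l.foldl f3 c, l.foldl f4 d, l.foldl f5 e, l.foldl f6 f) := by
  induction l generalizing a b c d e f with
  | nil => rfl
  | cons x xs ih => simp only [List.foldl_cons]; exact ih _ _ _ _ _ _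

-- the per-document steps of A and B agree on every state
theorem pv_step_eq (K1 K2 K3 : List String) (st : PvSt) (i : Int) (document : String) :
    (if K1.any (fun keyword => PySem.Str.isIn keyword (PySem.Str.lower document)) then
        pvA_update document i K1 K2 K3 st
      else st) = pvB_step K1 K2 K3 st i document := by
  set content := PySem.Str.lower document with hcontent
  set p : String → Bool := fun k => PySem.Str.isIn k content with hp
  set m1 := K1.filter p with hm1
  by_cases hany : K1.any p = true
  · have hm1ne : m1 ≠ [] := by
      simp only [hm1, ne_eq, List.filter_eq_nil_iff, not_forall]
      obtain ⟨k, hk, hpk⟩ := List.any_eq_true.mp hany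
      exact ⟨k, hk, by simp [hpk]⟩
    have hm1e : m1.isEmpty = false := by
      cases hm : m1 with
      | nil => exact absurd hm hm1ne
      | cons a l => simp
    rw [if_pos hany]
    -- rewrite A's per-document update as a fold over m1 and split the state
    have hA : pvA_update document i K1 K2 K3 st =
        m1.foldl (fun st kw =>
          (PySem.Set.add st.1 i,
           (pvA_pairs content i K2 st.2.1 st.2.2.2.1 kw st.2.2.2.2.2).1,
           st.2.2.1.insert kw (st.2.2.1.getD kw 0 + 1),
           (pvA_pairs content i K2 st.2.1 st.2.2.2.1 kw st.2.2.2.2.2).2.1,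
           pvA_k3 content K3 st.2.2.2.2.1,
           (pvA_pairs content i K2 st.2.1 st.2.2.2.1 kw st.2.2.2.2.2).2.2)) st := by
      rw [hm1, List.foldl_filter]
      rfl
    rw [hA]
    -- split into componentwise folds (pairs components depend only on their own slot)
    obtain ⟨a, b, c, d, e, f⟩ := st
    cases hfk : K2.find? p with
    | none =>
        have hpair : ∀ (num : PySem.Set Int) (d2 d12 : PySem.Dict String Int) (kw : String),
            pvA_pairs content i K2 num d2 kw d12 = (num, d2, d12) := by
          intro num d2 d12 kw; rw [pvA_pairs_eq]; rw [hp] at hfk; rw [hfk]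
        simp only [hpair]
        rw [pv_foldl_prod6 m1
          (fun s (_ : String) => PySem.Set.add s i)
          (fun s (_ : String) => s)
          (fun d kw => d.insert kw (d.getD kw 0 + 1))
          (fun d (_ : String) => d)
          (fun d (_ : String) => pvA_k3 content K3 d)
          (fun d (_ : String) => d) a b c d e f]
        rw [pv_foldl_set_add m1 hm1ne a i, List.foldl_fixed, List.foldl_fixed, List.foldl_fixed]
        have hk3 : m1.foldl (fun d (_ : String) => pvA_k3 content K3 d) e =
            pvPass p K3 (m1.length : Int) e := by
          have : (fun d (_ : String) => pvA_k3 content K3 d) =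
              (fun d (_ : String) => pvPass p K3 1 d) := by
            rfl
          rw [this]; exact pvPass_repeat p K3 m1 hm1ne e
        rw [hk3]
        simp only [pvB_step, ← hcontent, ← hp, ← hm1, hm1e, Bool.false_eq_true, if_false, hfk]
        rfl
    | some k2 =>
        have hpair : ∀ (num : PySem.Set Int) (d2 d12 : PySem.Dict String Int) (kw : String),
            pvA_pairs content i K2 num d2 kw d12 =
              (PySem.Set.add num i, pvBump k2 1 d2, pvBump (kw ++ "_" ++ k2) 1 d12) := by
          intro num d2 d12 kw; rw [pvA_pairs_eq]; rw [hp] at hfk; rw [hfk]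
        simp only [hpair]
        rw [pv_foldl_prod6 m1
          (fun s (_ : String) => PySem.Set.add s i)
          (fun s (_ : String) => PySem.Set.add s i)
          (fun d kw => d.insert kw (d.getD kw 0 + 1))
          (fun d (_ : String) => pvBump k2 1 d)
          (fun d (_ : String) => pvA_k3 content K3 d)
          (fun d kw => pvBump (kw ++ "_" ++ k2) 1 d) a b c d e f]
        rw [pv_foldl_set_add m1 hm1ne a i, pv_foldl_set_add m1 hm1ne b i]
        have hd2 : m1.foldl (fun d (_ : String) => pvBump k2 1 d) d =
            pvBump k2 (m1.length : Int) d := by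
          have : (fun d (_ : String) => pvBump k2 1 d) =
              (fun d (_ : String) => pvPass (fun _ => true) [k2] 1 d) := by
            funext d kw; simp [pvPass]
          rw [this, pvPass_repeat (fun _ => true) [k2] m1 hm1ne d]
          simp [pvPass]
        have hk3 : m1.foldl (fun d (_ : String) => pvA_k3 content K3 d) e =
            pvPass p K3 (m1.length : Int) e := by
          have : (fun d (_ : String) => pvA_k3 content K3 d) =
              (fun d (_ : String) => pvPass p K3 1 d) := by
            rfl
          rw [this]; exact pvPass_repeat p K3 m1 hm1ne e
        rw [hd2, hk3]
        simp only [pvB_step, ← hcontent, ← hp, ← hm1, hm1e, Bool.false_eq_true, if_false, hfk]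
        rfl
  · have hm1nil : m1 = [] := by
      simp only [hm1, List.filter_eq_nil_iff]
      intro k hk
      simp only [List.any_eq_true, not_exists, not_and] at hany
      intro hpk
      exact absurd hpk (by simpa using hany k hk)
    rw [if_neg (by simpa using hany)]
    have hfil : List.filter (fun k => PySem.Chars.isIn k.toList content.toList) K1 = [] := hm1nil
    simp only [pvB_step, PySem.Str.isIn_eq, ← hcontent, hfil, List.isEmpty_nil, if_true]

-- ===== VERDICT (by name: the statement is the Claim_ definition above) =====
theorem analyze_documents_spec : Claim_equal_analyze_documents := by
  intro documents K1 K2 K3 _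
  unfold Spec_analyze_documents analyze_documents analyze_documents_alt
  have hfold :
      (PySem.List.enumerate documents).foldl (fun st p =>
        let content := PySem.Str.lower p.2
        if K1.any (fun keyword => PySem.Str.isIn keyword content) then
          pvA_update p.2 p.1 K1 K2 K3 st
        else st)
        (PySem.Set.empty, PySem.Set.empty, PySem.Dict.empty, PySem.Dict.empty, PySem.Dict.empty, PySem.Dict.empty) =
      (PySem.List.enumerate documents).foldl (fun st p => pvB_step K1 K2 K3 st p.1 p.2)
        (PySem.Set.empty, PySem.Set.empty, PySem.Dict.empty, PySem.Dict.empty, PySem.Dict.empty, PySem.Dict.empty) := by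
    apply List.foldl_ext
    intro st pr _
    exact pv_step_eq K1 K2 K3 st pr.1 pr.2
  rw [hfold]
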